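-- pv_equiv track=rewrite | github.com/felixrauh/conference_scheduler | src/matching_pipeline.py | compute_tuple_cost_talk_level
-- ===== SOURCE A (Python) =====
-- from typing import Dict, List, Set, Tuple, Optional, FrozenSet
--
-- def compute_tuple_cost_talk_level(
--     block_tuple: Tuple[Tuple[str, ...], ...],
--     preferences: Dict[str, Set[str]]
-- ) -> int:
--     """
--     Compute missed attendance cost for a tuple of blocks (talk-level).
--
--     For each participant:
--     1. Count interested talks per block
--     2. Choose the block with most interested talks
--     3. Cost = sum of interested talks in OTHER blocks
--
--     Args:
--         block_tuple: Tuple of blocks (each block is a tuple of talk_ids)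
--         preferences: Participant preferences
--
--     Returns:
--         Total missed talks across all participants
--     """
--     cost = 0
--
--     for p_id, prefs in preferences.items():
--         # Count interested talks per block
--         block_counts = []
--         for block in block_tuple:
--             count = sum(1 for talk in block if talk in prefs)
--             block_counts.append(count)
--
--         if not any(block_counts):
--             continue
--
--         # Participant chooses block with max interested talks
--         max_count = max(block_counts)
--         total_interested = sum(block_counts)
--
--         # Missed = total - max (talks in other blocks)
--         missed = total_interested - max_count
--         cost += missed
--
--     return cost
-- ===== SOURCE B (Python) =====
-- def compute_tuple_cost_talk_level(block_tuple, preferences):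
--     # Precompute talk -> list of block indices (with multiplicity), once.
--     index = {}
--     for i, block in enumerate(block_tuple):
--         for talk in block:
--             index.setdefault(talk, []).append(i)
--     n = len(block_tuple)
--     cost = 0
--     for prefs in preferences.values():
--         counts = [0] * n
--         for talk in prefs:
--             for i in index.get(talk, ()):
--                 counts[i] += 1
--         if not any(counts):
--             continue
--         cost += sum(counts) - max(counts)
--     return cost
-- ===== Notes on version B (the rewrite author's own statement) =====
-- stated objective: faster
-- what changed: A scans every talk of every block once per participant; B builds a talk->block-indices dictionary once and per participant tallies block counts by looking up only that participant's preferred talks.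
-- outside the precondition, e.g. on compute_tuple_cost_talk_level((('t0',), ('t0',)), {'p': ['t0', 't0']}): A returns 1, B returns 2
import Mathlib
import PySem

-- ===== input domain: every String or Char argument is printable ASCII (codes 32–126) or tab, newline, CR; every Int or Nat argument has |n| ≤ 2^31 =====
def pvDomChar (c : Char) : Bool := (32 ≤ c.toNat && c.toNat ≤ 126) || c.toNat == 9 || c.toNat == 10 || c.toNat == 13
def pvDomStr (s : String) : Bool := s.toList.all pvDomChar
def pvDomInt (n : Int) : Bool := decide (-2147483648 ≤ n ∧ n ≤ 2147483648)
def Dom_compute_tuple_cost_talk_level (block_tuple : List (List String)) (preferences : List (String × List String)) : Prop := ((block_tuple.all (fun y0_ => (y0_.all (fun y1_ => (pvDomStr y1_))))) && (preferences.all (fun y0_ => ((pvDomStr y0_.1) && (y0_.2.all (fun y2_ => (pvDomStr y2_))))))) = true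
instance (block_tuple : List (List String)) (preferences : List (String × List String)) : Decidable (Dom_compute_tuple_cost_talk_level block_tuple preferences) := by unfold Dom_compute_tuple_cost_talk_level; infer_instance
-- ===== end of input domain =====

-- B replaces A's per-participant scan over every talk of every block by a talk→block-indices
-- dictionary built once; per participant only that participant's preferences are touched (faster).

-- ===== PORT A =====
-- count = sum(1 for talk in block if talk in prefs)
def pvBlockCount (prefs block : List String) : Int :=
  block.foldl (fun c talk => if prefs.contains talk then c + 1 else c) 0

-- block_counts built by appending, as A does
def pvBlockCounts (block_tuple : List (List String)) (prefs : List String) : List Int :=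
  block_tuple.foldl (fun acc block => acc ++ [pvBlockCount prefs block]) []

def compute_tuple_cost_talk_level (block_tuple : List (List String)) (preferences : List (String × List String)) : Int :=
  preferences.foldl (fun cost pr =>
    let block_counts := pvBlockCounts block_tuple pr.2
    -- 'if not any(block_counts): continue'; inside the branch the list is nonempty,
    -- so max(block_counts) cannot raise and .getD 0 is never taken
    if block_counts.any (fun c => c != 0) then
      let max_count := (PySem.List.max? block_counts (fun c => c)).getD 0
      let total_interested := block_counts.sum
      cost + (total_interested - max_count)
    else cost) 0

-- ===== PORT B =====
-- index = {}; for i, block in enumerate(block_tuple): for talk in block: index.setdefault(talk, []).append(i)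
-- (enumerate ported via List.zipIdx; the indices are the nonnegative positions, kept as Nat)
def pvBuildIndex (block_tuple : List (List String)) : PySem.Dict String (List Nat) :=
  block_tuple.zipIdx.foldl
    (fun d p => p.1.foldl (fun d talk => d.modify talk [] (· ++ [p.2])) d) PySem.Dict.empty

-- counts = [0]*n; for talk in prefs: for i in index.get(talk, ()): counts[i] += 1
def pvTally (idx : PySem.Dict String (List Nat)) (prefs : List String) (n : Nat) : List Int :=
  prefs.foldl (fun cs talk =>
    (idx.getD talk []).foldl (fun cs i => cs.set i (cs.getD i 0 + 1)) cs)
    (List.replicate n 0)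

def compute_tuple_cost_talk_level_alt (block_tuple : List (List String)) (preferences : List (String × List String)) : Int :=
  let idx := pvBuildIndex block_tuple
  let n := block_tuple.length
  preferences.foldl (fun cost pr =>
    let counts := pvTally idx pr.2 n
    if counts.any (fun c => c != 0) then
      cost + (counts.sum - (PySem.List.max? counts (fun c => c)).getD 0)
    else cost) 0

-- ===== PRECONDITION & SPEC =====
-- Each participant's preferences value is a Python set; only lists of DISTINCT strings represent
-- such a set, so Pre_ requires every preference list to be duplicate-free (a duplicated entry
-- would be counted once by A's membership test but twice by B's iteration).
def Pre_compute_tuple_cost_talk_level (block_tuple : List (List String)) (preferences : List (String × List String)) : Prop :=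
  ∀ pr ∈ preferences, pr.2.Nodup
instance (block_tuple : List (List String)) (preferences : List (String × List String)) : Decidable (Pre_compute_tuple_cost_talk_level block_tuple preferences) := by unfold Pre_compute_tuple_cost_talk_level; infer_instance

def pvWitness_compute_tuple_cost_talk_level : List (List String) × (List (String × List String)) :=
  ([["a", "b"], ["c"]], [("p1", ["a", "c"]), ("p2", ["b"])])

def Spec_compute_tuple_cost_talk_level (block_tuple : List (List String)) (preferences : List (String × List String)) (out : Int) : Prop := out = compute_tuple_cost_talk_level_alt block_tuple preferences
instance (block_tuple : List (List String)) (preferences : List (String × List String)) (out : Int) : Decidable (Spec_compute_tuple_cost_talk_level block_tuple preferences out) := by unfold Spec_compute_tuple_cost_talk_level; infer_instance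

-- ===== CLAIM (what is proved, stated in full; the proofs are below) =====
def Claim_equal_compute_tuple_cost_talk_level : Prop := ∀ (block_tuple : List (List String)) (preferences : List (String × List String)), Dom_compute_tuple_cost_talk_level block_tuple preferences → Pre_compute_tuple_cost_talk_level block_tuple preferences → Spec_compute_tuple_cost_talk_level block_tuple preferences (compute_tuple_cost_talk_level block_tuple preferences)

-- ===== LEMMAS AND PROOFS =====

-- one block's inner fold appends its index once per occurrence of the talk
theorem pv_block_fold_getD (block : List String) (i : Nat) (d : PySem.Dict String (List Nat)) (talk : String) :
    (block.foldl (fun d t => d.modify t [] (· ++ [i])) d).getD talk []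
      = d.getD talk [] ++ List.replicate (block.count talk) i := by
  have h := List.foldl_map (f := fun t => (t, i)) (g := fun (d : PySem.Dict String (List Nat)) (p : String × Nat) => d.modify p.1 [] (· ++ [p.2])) (l := block) (init := d)
  rw [← h, PySem.Dict.getD_foldl_modify_append]
  congr 1
  rw [List.filter_map]
  simp only [List.map_map, Function.comp_def]
  rw [List.map_const']
  simp [List.count, List.countP_eq_length_filter]

-- the whole index fold, over any list of (block, index) pairs
theorem pv_index_fold_getD (ps : List (List String × Nat)) (d : PySem.Dict String (List Nat)) (talk : String) :
    (ps.foldl (fun d p => p.1.foldl (fun d t => d.modify t [] (· ++ [p.2])) d) d).getD talk []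
      = d.getD talk [] ++ ps.flatMap (fun p => List.replicate (p.1.count talk) p.2) := by
  induction ps generalizing d with
  | nil => simp
  | cons p ps ih =>
      simp only [List.foldl_cons, List.flatMap_cons]
      rw [ih, pv_block_fold_getD]
      simp

-- counting an index j in the flattened index lists recovers the talk count of block j
theorem pv_count_flatMap (block_tuple : List (List String)) (k : Nat) (talk : String) (j : Nat) :
    ((block_tuple.zipIdx k).flatMap (fun p => List.replicate (p.1.count talk) p.2)).count j
      = if k ≤ j then (block_tuple.getD (j - k) []).count talk else 0 := by
  induction block_tuple generalizing k with
  | nil => simp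
  | cons b bt ih =>
      simp only [List.zipIdx_cons, List.flatMap_cons, List.count_append, List.count_replicate, ih]
      rcases Nat.lt_trichotomy k j with h | h | h
      · have h1 : k + 1 ≤ j := h
        have h2 : j - k = (j - (k + 1)) + 1 := by omega
        simp [Nat.le_of_lt h, h1, h2]
        intro h'; omega
      · subst h; simp
      · simp [Nat.not_le.mpr h, show ¬ (k + 1 ≤ j) by omega]
        intro h'; omega

theorem pv_index_getD (block_tuple : List (List String)) (talk : String) (j : Nat) :
    ((pvBuildIndex block_tuple).getD talk []).count j = ((block_tuple.getD j []).count talk) := by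
  unfold pvBuildIndex
  rw [pv_index_fold_getD]
  simp [pv_count_flatMap block_tuple 0 talk j]

-- the increment loop adds, at every position, the number of occurrences of that position
theorem pv_incr_fold (L : List Nat) (cs : List Int) (hL : ∀ i ∈ L, i < cs.length) :
    (L.foldl (fun cs i => cs.set i (cs.getD i 0 + 1)) cs).length = cs.length ∧
    ∀ j : Nat, (L.foldl (fun cs i => cs.set i (cs.getD i 0 + 1)) cs).getD j 0
      = cs.getD j 0 + (L.count j : Int) := by
  induction L generalizing cs with
  | nil => simp
  | cons i L ih =>
      have hi : i < cs.length := hL i (by simp)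
      have hlen : (cs.set i (cs.getD i 0 + 1)).length = cs.length := by simp
      have hL' : ∀ x ∈ L, x < (cs.set i (cs.getD i 0 + 1)).length := by
        intro x hx; rw [hlen]; exact hL x (List.mem_cons_of_mem _ hx)
      obtain ⟨ih1, ih2⟩ := ih (cs.set i (cs.getD i 0 + 1)) hL'
      constructor
      · simpa [hlen] using ih1
      · intro j
        rw [List.foldl_cons, ih2 j]
        by_cases hij : i = j
        · subst hij
          simp [List.getD, hi]
          ring
        · simp [List.getD, hij]

-- the tally fold from any start list of the right length
theorem pv_tally_aux (block_tuple : List (List String)) (prefs : List String) (cs : List Int)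
    (hlen : cs.length = block_tuple.length) :
    (prefs.foldl (fun cs talk =>
        (((pvBuildIndex block_tuple).getD talk []).foldl (fun cs i => cs.set i (cs.getD i 0 + 1)) cs)) cs).length
      = block_tuple.length ∧
    ∀ j : Nat, (prefs.foldl (fun cs talk =>
        (((pvBuildIndex block_tuple).getD talk []).foldl (fun cs i => cs.set i (cs.getD i 0 + 1)) cs)) cs).getD j 0
      = cs.getD j 0 + (prefs.map (fun t => ((block_tuple.getD j []).count t : Int))).sum := by
  induction prefs generalizing cs with
  | nil => simp [hlen]
  | cons t prefs ih =>
      have hbound : ∀ i ∈ (pvBuildIndex block_tuple).getD t [], i < cs.length := by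
        intro i hi
        by_contra hge
        have hge' : cs.length ≤ i := Nat.le_of_not_lt hge
        have hpos : 0 < ((pvBuildIndex block_tuple).getD t []).count i := List.count_pos_iff.mpr hi
        rw [pv_index_getD, List.getD_eq_default _ _ (by omega)] at hpos
        simp at hpos
      obtain ⟨h1, h2⟩ := pv_incr_fold ((pvBuildIndex block_tuple).getD t []) cs hbound
      obtain ⟨ih1, ih2⟩ := ih _ (h1.trans hlen)
      refine ⟨ih1, ?_⟩
      intro j
      rw [List.foldl_cons, ih2 j, h2 j, pv_index_getD]
      simp [List.map_cons]
      ring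

-- distinct-preference sum of per-talk counts is A's membership count
theorem pv_sum_count_eq_countP (prefs block : List String) (hnd : prefs.Nodup) :
    (prefs.map (fun t => (block.count t : Int))).sum = (block.countP (fun t => prefs.contains t) : Int) := by
  induction block with
  | nil => simp
  | cons b bs ih =>
      simp only [List.count_cons, List.countP_cons]
      have hsplit : (prefs.map (fun t => ((bs.count t + if b == t then 1 else 0 : Nat) : Int))).sum
          = (prefs.map (fun t => (bs.count t : Int))).sum
            + (prefs.map (fun t => if (fun t => b == t) t = true then (1:Int) else 0)).sum := by
        rw [← PySem.List.sum_map_add_int]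
        congr 1
        refine List.map_congr_left ?_
        intro t _
        by_cases h : b == t <;> simp [h]
      rw [hsplit, ih, PySem.List.sum_map_ite_one_zero]
      have hcnt : prefs.countP (fun t => b == t) = prefs.count b := by
        unfold List.count
        apply List.countP_congr
        intro x _; constructor <;> intro h <;> simp at h <;> simp [h]
      rw [hcnt]
      by_cases hb : b ∈ prefs
      · rw [List.count_eq_one_of_mem hnd hb]
        simp [hb]
      · rw [List.count_eq_zero.mpr hb]
        simp [hb]

theorem pv_blockCounts_eq_map (block_tuple : List (List String)) (prefs : List String) :
    pvBlockCounts block_tuple prefs = block_tuple.map (fun block => (block.countP (fun t => prefs.contains t) : Int)) := by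
  unfold pvBlockCounts
  rw [PySem.List.foldl_append_singleton_eq_map]
  simp only [List.nil_append]
  refine List.map_congr_left ?_
  intro block _
  unfold pvBlockCount
  rw [PySem.List.foldl_count_if]
  simp only [zero_add]

theorem pv_tally_eq_blockCounts (block_tuple : List (List String)) (prefs : List String) (hnd : prefs.Nodup) :
    pvTally (pvBuildIndex block_tuple) prefs block_tuple.length = pvBlockCounts block_tuple prefs := by
  have haux := pv_tally_aux block_tuple prefs (List.replicate block_tuple.length 0) (by simp)
  rw [pv_blockCounts_eq_map]
  unfold pvTally
  obtain ⟨hlen, hval⟩ := haux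
  apply List.ext_getElem
  · rw [List.length_map]
    exact hlen
  · intro i h1 h2
    have hbt : i < block_tuple.length := by simpa using h2
    rw [← List.getD_eq_getElem _ 0 h1, hval i]
    have hrep : (List.replicate block_tuple.length (0:Int)).getD i 0 = 0 := by
      rw [List.getD_eq_getElem _ _ (by simpa using hbt)]
      simp
    rw [hrep, zero_add]
    simp only [List.getElem_map]
    rw [List.getD_eq_getElem _ _ hbt]
    exact pv_sum_count_eq_countP prefs (block_tuple[i]) hnd

-- ===== VERDICT (by name: the statement is the Claim_ definition above) =====
theorem compute_tuple_cost_talk_level_spec : Claim_equal_compute_tuple_cost_talk_level := by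
  intro block_tuple preferences _ hpre
  unfold Spec_compute_tuple_cost_talk_level compute_tuple_cost_talk_level compute_tuple_cost_talk_level_alt
  refine (PySem.List.foldl_congr_mem _ _ _ _ ?_)
  intro acc pr hmem
  simp only
  rw [pv_tally_eq_blockCounts block_tuple pr.2 (hpre pr hmem)]
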